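-- pv_equiv track=rewrite | github.com/evgeni-g-georgiev/tinyguard | simulation/metrics.py | contiguous_runs
-- ===== SOURCE A (Python) =====
-- def contiguous_runs(values, target) -> list[tuple[int, int]]:
--     """[(start, end_inclusive), ...] for each contiguous run equal to `target`."""
--     runs, start = [], None
--     for i, v in enumerate(values):
--         if v == target and start is None:
--             start = i
--         elif v != target and start is not None:
--             runs.append((start, i - 1)); start = None
--     if start is not None:
--         runs.append((start, len(values) - 1))
--     return runs
-- ===== SOURCE B (Python) =====
-- from itertools import groupby
--
-- def contiguous_runs(values, target) -> list[tuple[int, int]]: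
--     """[(start, end_inclusive), ...] for each contiguous run equal to `target`."""
--     runs, idx = [], 0
--     for is_target, group in groupby(values, key=lambda v: v == target):
--         length = sum(1 for _ in group)
--         if is_target:
--             runs.append((idx, idx + length - 1))
--         idx += length
--     return runs
-- ===== Notes on version B (the rewrite author's own statement) =====
-- stated objective: idiomatic
-- what changed: Replaced A's open-run sentinel state machine (a start flag carried across the loop plus a trailing-run flush after it) with an itertools.groupby decomposition: each maximal group of equal key (v == target) is measured once and emitted directly with a running index offset.
import Mathlib
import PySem

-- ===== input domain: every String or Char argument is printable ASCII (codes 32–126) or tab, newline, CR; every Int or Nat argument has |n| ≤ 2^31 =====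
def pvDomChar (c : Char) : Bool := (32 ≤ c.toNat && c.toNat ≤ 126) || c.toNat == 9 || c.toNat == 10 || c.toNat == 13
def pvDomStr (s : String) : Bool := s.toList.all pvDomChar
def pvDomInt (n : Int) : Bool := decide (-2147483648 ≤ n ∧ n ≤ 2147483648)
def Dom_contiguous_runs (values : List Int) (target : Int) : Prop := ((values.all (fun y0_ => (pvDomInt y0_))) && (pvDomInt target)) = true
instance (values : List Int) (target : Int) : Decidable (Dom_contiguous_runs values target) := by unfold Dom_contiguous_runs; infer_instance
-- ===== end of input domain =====

-- B replaces A's open-run sentinel state machine with a groupby-style decomposition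
-- (consume one maximal equal-key group at a time with a running index offset); objective: idiomatic.


-- ===== PORT A =====
-- loop body of A: state is (runs, start); branch order as in the Python if/elif
def pvStepA (target : Int) (st : List (Int × Int) × Option Int) (iv : Int × Int) : List (Int × Int) × Option Int :=
  match st, iv with
  | (runs, start), (i, v) =>
    match start with
    | none => if v = target then (runs, some i) else (runs, none)
    | some s => if v ≠ target then (runs ++ [(s, i - 1)], none) else (runs, some s)

def contiguous_runs (values : List Int) (target : Int) : List (Int × Int) :=
  let st := (PySem.List.enumerate values).foldl (pvStepA target) ([], none)
  match st.2 with
  | some s => st.1 ++ [(s, (values.length : Int) - 1)]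
  | none => st.1

-- ===== PORT B =====
-- one iteration of Source B's groupby loop: peel the leading maximal group of equal key (v == target)
def pvAltGo (target : Int) : List Int → Int → List (Int × Int)
  | [], _ => []
  | v :: rest, idx =>
    let k := v == target
    let grp := rest.takeWhile (fun x => (x == target) == k)
    let len : Int := 1 + (grp.length : Int)
    let rest' := rest.dropWhile (fun x => (x == target) == k)
    if k then (idx, idx + len - 1) :: pvAltGo target rest' (idx + len)
    else pvAltGo target rest' (idx + len)
termination_by vs _ => vs.length
decreasing_by
  all_goals
    simp only [List.length_cons]
    exact Nat.lt_succ_of_le (List.length_dropWhile_le _ _)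

def contiguous_runs_alt (values : List Int) (target : Int) : List (Int × Int) :=
  pvAltGo target values 0

-- ===== PRECONDITION & SPEC =====
def Spec_contiguous_runs (values : List Int) (target : Int) (out : List (Int × Int)) : Prop := out = contiguous_runs_alt values target
instance (values : List Int) (target : Int) (out : List (Int × Int)) : Decidable (Spec_contiguous_runs values target out) := by unfold Spec_contiguous_runs; infer_instance

-- ===== CLAIM (what is proved, stated in full; the proofs are below) =====
def Claim_equal_contiguous_runs : Prop := ∀ (values : List Int) (target : Int), Dom_contiguous_runs values target → Spec_contiguous_runs values target (contiguous_runs values target)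

-- ===== LEMMAS AND PROOFS =====

-- A's trailing flush, as a function of the loop's final state and the list length offset
def pvFinish (st : List (Int × Int) × Option Int) (n : Int) : List (Int × Int) :=
  match st.2 with
  | some s => st.1 ++ [(s, n - 1)]
  | none => st.1

-- with an open run, target elements leave A's state unchanged
theorem pvSkipT (target : Int) (t : List Int) (ht : ∀ x ∈ t, x = target) :
    ∀ (rest : List Int) (i : Int) (acc : List (Int × Int)) (s : Int),
    (PySem.List.enumerate (t ++ rest) i).foldl (pvStepA target) (acc, some s)
      = (PySem.List.enumerate rest (i + (t.length : Int))).foldl (pvStepA target) (acc, some s) := by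
  induction t with
  | nil => intro rest i acc s; simp
  | cons x t' ih =>
    intro rest i acc s
    have hx : x = target := ht x (by simp)
    have ht' : ∀ y ∈ t', y = target := fun y hy => ht y (by simp [hy])
    simp only [List.cons_append, PySem.List.enumerate_cons, List.foldl_cons]
    have : pvStepA target (acc, some s) (i, x) = (acc, some s) := by
      simp [pvStepA, hx]
    rw [this, ih ht' rest (i + 1) acc s]
    have hidx : i + 1 + ((t'.length : Int)) = i + (((x :: t').length : Int)) := by
      simp only [List.length_cons]; push_cast; ring
    rw [hidx]

-- with no open run, non-target elements leave A's state unchanged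
theorem pvSkipN (target : Int) (t : List Int) (ht : ∀ x ∈ t, x ≠ target) :
    ∀ (rest : List Int) (i : Int) (acc : List (Int × Int)),
    (PySem.List.enumerate (t ++ rest) i).foldl (pvStepA target) (acc, none)
      = (PySem.List.enumerate rest (i + (t.length : Int))).foldl (pvStepA target) (acc, none) := by
  induction t with
  | nil => intro rest i acc; simp
  | cons x t' ih =>
    intro rest i acc
    have hx : x ≠ target := ht x (by simp)
    have ht' : ∀ y ∈ t', y ≠ target := fun y hy => ht y (by simp [hy])
    simp only [List.cons_append, PySem.List.enumerate_cons, List.foldl_cons]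
    have : pvStepA target (acc, none) (i, x) = (acc, none) := by
      simp [pvStepA, hx]
    rw [this, ih ht' rest (i + 1) acc]
    have hidx : i + 1 + ((t'.length : Int)) = i + (((x :: t').length : Int)) := by
      simp only [List.length_cons]; push_cast; ring
    rw [hidx]

-- main invariant: A's finished loop, started with no open run, equals acc ++ B's group recursion
theorem pvMain (target : Int) :
    ∀ (n : Nat) (vs : List Int), vs.length ≤ n → ∀ (i : Int) (acc : List (Int × Int)),
    pvFinish ((PySem.List.enumerate vs i).foldl (pvStepA target) (acc, none)) (i + (vs.length : Int))
      = acc ++ pvAltGo target vs i := by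
  intro n
  induction n with
  | zero =>
    intro vs hlen i acc
    have : vs = [] := List.eq_nil_of_length_eq_zero (Nat.le_zero.mp hlen)
    subst this
    simp [pvFinish, pvAltGo]
  | succ n ih =>
    intro vs hlen i acc
    match vs with
    | [] => simp [pvFinish, pvAltGo]
    | v :: rest =>
      by_cases hv : v = target
      · -- leading group is a target run
        subst hv
        have hsplit : rest.takeWhile (fun x => x == v)
            ++ rest.dropWhile (fun x => x == v) = rest :=
          List.takeWhile_append_dropWhile
        set t := rest.takeWhile (fun x => x == v) with htdef
        set r := rest.dropWhile (fun x => x == v) with hrdef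
        have htT : ∀ x ∈ t, x = v := by
          intro x hx
          rw [htdef] at hx
          exact eq_of_beq (List.mem_takeWhile_imp (p := fun y => y == v) hx)
        have step1 : (PySem.List.enumerate (v :: rest) i).foldl (pvStepA v) (acc, none)
            = (PySem.List.enumerate rest (i + 1)).foldl (pvStepA v) (acc, some i) := by
          simp [PySem.List.enumerate_cons, pvStepA]
        have hfold : (PySem.List.enumerate rest (i + 1)).foldl (pvStepA v) (acc, some i)
            = (PySem.List.enumerate r (i + 1 + (t.length : Int))).foldl (pvStepA v) (acc, some i) := by
          conv_lhs => rw [← hsplit]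
          exact pvSkipT v t htT r (i + 1) acc i
        have hgo : pvAltGo v (v :: rest) i
            = (i, i + (1 + (t.length : Int)) - 1) :: pvAltGo v r (i + (1 + (t.length : Int))) := by
          rw [pvAltGo]
          simp only [beq_self_eq_true, beq_true, if_true, ← htdef, ← hrdef]
        rw [step1, hfold, hgo]
        rcases hr : r with _ | ⟨w, ws⟩
        · -- run reaches the end of the list
          have hend : i + (((v :: rest).length : Int)) - 1 = i + (1 + (t.length : Int)) - 1 := by
            have := congrArg List.length hsplit
            rw [hr] at this
            simp only [List.append_nil] at this
            simp only [List.length_cons, ← this]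
            push_cast
            ring
          simp only [PySem.List.enumerate_nil, List.foldl_nil, pvFinish, pvAltGo, hend]
        · -- run ends at w ≠ v
          have hw : w ≠ v := by
            have h := List.head?_dropWhile_not (fun x => x == v) rest
            rw [← hrdef, hr] at h
            simp only [List.head?_cons] at h
            intro he; subst he
            simp at h
          simp only [PySem.List.enumerate_cons, List.foldl_cons]
          have step2 : pvStepA v ((acc, some i)) (i + 1 + (t.length : Int), w)
              = (acc ++ [(i, i + 1 + (t.length : Int) - 1)], none) := by
            simp [pvStepA, hw]
          rw [step2]
          -- skip the following non-target group inside ws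
          have hsplit2 : ws.takeWhile (fun x => !(x == v))
              ++ ws.dropWhile (fun x => !(x == v)) = ws :=
            List.takeWhile_append_dropWhile
          set t2 := ws.takeWhile (fun x => !(x == v)) with ht2def
          set r2 := ws.dropWhile (fun x => !(x == v)) with hr2def
          have htN : ∀ x ∈ t2, x ≠ v := by
            intro x hx
            rw [ht2def] at hx
            have := List.mem_takeWhile_imp hx
            simpa using this
          have hfold2 : (PySem.List.enumerate ws (i + 1 + (t.length : Int) + 1)).foldl (pvStepA v)
                (acc ++ [(i, i + 1 + (t.length : Int) - 1)], none)
              = (PySem.List.enumerate r2 (i + 1 + (t.length : Int) + 1 + (t2.length : Int))).foldl (pvStepA v)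
                (acc ++ [(i, i + 1 + (t.length : Int) - 1)], none) := by
            conv_lhs => rw [← hsplit2]
            exact pvSkipN v t2 htN r2 (i + 1 + (t.length : Int) + 1) _
          rw [hfold2]
          have hgo2 : pvAltGo v (w :: ws) (i + (1 + (t.length : Int)))
              = pvAltGo v r2 (i + (1 + (t.length : Int)) + (1 + (t2.length : Int))) := by
            rw [pvAltGo]
            simp only [beq_false_of_ne hw, beq_false, if_false, Bool.false_eq_true,
              ← ht2def, ← hr2def]
          rw [hgo2]
          have hlen2 : r2.length ≤ n := by
            have h1 : r2.length ≤ ws.length := hr2def ▸ List.length_dropWhile_le _ _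
            have h2 := congrArg List.length hsplit
            rw [hr] at h2
            simp only [List.length_append, List.length_cons] at h2
            simp only [List.length_cons] at hlen
            omega
          have ihres := ih r2 hlen2 (i + 1 + (t.length : Int) + 1 + (t2.length : Int))
            (acc ++ [(i, i + 1 + (t.length : Int) - 1)])
          have hidx : i + 1 + (t.length : Int) + 1 + (t2.length : Int) + (r2.length : Int)
              = i + (((v :: rest).length : Int)) := by
            have h2 := congrArg List.length hsplit
            rw [hr] at h2
            simp only [List.length_append, List.length_cons] at h2
            have h3 := congrArg List.length hsplit2
            simp only [List.length_append] at h3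
            simp only [List.length_cons]
            push_cast
            omega
          rw [← hidx, ihres]
          have harg : i + 1 + (t.length : Int) + 1 + (t2.length : Int)
              = i + (1 + (t.length : Int)) + (1 + (t2.length : Int)) := by ring
          rw [harg]
          have hpair : i + 1 + (t.length : Int) - 1 = i + (1 + (t.length : Int)) - 1 := by ring
          rw [hpair]
          simp
      · -- leading group is a non-target run: A skips it, B skips it in one step
        have hsplit : rest.takeWhile (fun x => !(x == target))
            ++ rest.dropWhile (fun x => !(x == target)) = rest :=
          List.takeWhile_append_dropWhile
        set t := rest.takeWhile (fun x => !(x == target)) with htdef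
        set r := rest.dropWhile (fun x => !(x == target)) with hrdef
        have htN : ∀ x ∈ t, x ≠ target := by
          intro x hx
          rw [htdef] at hx
          have := List.mem_takeWhile_imp hx
          simpa using this
        have step1 : (PySem.List.enumerate (v :: rest) i).foldl (pvStepA target) (acc, none)
            = (PySem.List.enumerate rest (i + 1)).foldl (pvStepA target) (acc, none) := by
          simp [PySem.List.enumerate_cons, pvStepA, hv]
        have hfold : (PySem.List.enumerate rest (i + 1)).foldl (pvStepA target) (acc, none)
            = (PySem.List.enumerate r (i + 1 + (t.length : Int))).foldl (pvStepA target) (acc, none) := by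
          conv_lhs => rw [← hsplit]
          exact pvSkipN target t htN r (i + 1) acc
        have hgo : pvAltGo target (v :: rest) i
            = pvAltGo target r (i + (1 + (t.length : Int))) := by
          rw [pvAltGo]
          simp only [beq_false_of_ne hv, beq_false, if_false, Bool.false_eq_true,
            ← htdef, ← hrdef]
        rw [step1, hfold, hgo]
        have hlen2 : r.length ≤ n := by
          have h1 : r.length ≤ rest.length := hrdef ▸ List.length_dropWhile_le _ _
          simp only [List.length_cons] at hlen
          omega
        have ihres := ih r hlen2 (i + 1 + (t.length : Int)) acc
        have hidx : i + 1 + (t.length : Int) + (r.length : Int)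
            = i + (((v :: rest).length : Int)) := by
          have h3 := congrArg List.length hsplit
          simp only [List.length_append] at h3
          simp only [List.length_cons]
          push_cast
          omega
        rw [← hidx, ihres]
        have harg : i + 1 + (t.length : Int) = i + (1 + (t.length : Int)) := by ring
        rw [harg]

-- ===== VERDICT (by name: the statement is the Claim_ definition above) =====
theorem contiguous_runs_spec : Claim_equal_contiguous_runs := by
  intro values target _
  unfold Spec_contiguous_runs contiguous_runs contiguous_runs_alt
  have h := pvMain target values.length values (le_refl _) 0 []
  simp only [List.nil_append, zero_add] at h
  rw [← h]
  rfl
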